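-- pv_equiv track=rewrite | github.com/CPompey1/Wayfinder | test_sort_nodes.py | func
-- ===== SOURCE A (Python) =====
-- def func(bfs,start,goal):
--     startingFloor = start[0][2]
--     twoFloors = False
--     before_stairs = []
--     after_stairs =  []
--     for nodeId in start:
--         #if floors are different
--         if startingFloor != nodeId[2] and not twoFloors:
--             before_stairs = after_stairs
--             after_stairs = []
--             after_stairs.append(nodeId)
--             twoFloors = True
--         else:
--             after_stairs.append(nodeId)
--
--     return before_stairs,after_stairs
-- ===== SOURCE B (Python) =====
-- def func(bfs, start, goal):
--     startingFloor = start[0][2]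
--     split = next((i for i, node in enumerate(start) if node[2] != startingFloor), 0)
--     return start[:split], start[split:]
-- ===== Notes on version B (the rewrite author's own statement) =====
-- stated objective: simpler
-- what changed: Replaces the flag-and-two-accumulator loop by computing the index of the first floor change (default 0, reproducing the ([], all) result when the floor never changes) and slicing the list there.
import Mathlib
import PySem

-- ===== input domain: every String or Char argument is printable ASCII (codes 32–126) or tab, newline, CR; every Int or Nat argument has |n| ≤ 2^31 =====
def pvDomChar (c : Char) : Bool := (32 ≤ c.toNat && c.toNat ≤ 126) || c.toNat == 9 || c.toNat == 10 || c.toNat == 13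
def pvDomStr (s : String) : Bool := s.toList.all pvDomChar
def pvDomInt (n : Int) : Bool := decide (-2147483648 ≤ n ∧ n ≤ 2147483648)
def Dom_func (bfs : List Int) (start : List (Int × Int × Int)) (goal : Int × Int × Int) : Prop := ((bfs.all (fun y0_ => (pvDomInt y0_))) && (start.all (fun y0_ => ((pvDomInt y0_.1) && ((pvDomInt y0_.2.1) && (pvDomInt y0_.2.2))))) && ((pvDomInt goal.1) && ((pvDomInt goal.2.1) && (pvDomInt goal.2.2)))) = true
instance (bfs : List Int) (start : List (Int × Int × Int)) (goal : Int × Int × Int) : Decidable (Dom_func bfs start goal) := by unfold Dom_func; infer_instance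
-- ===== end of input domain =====

-- B replaces A's flag-and-two-accumulator loop by finding the first floor-change index and slicing there (objective: simpler).


-- ===== PORT A =====
-- loop state: (twoFloors, before_stairs, after_stairs)
def funcStepA (sf : Int) (acc : Bool × List (Int × Int × Int) × List (Int × Int × Int))
    (n : Int × Int × Int) : Bool × List (Int × Int × Int) × List (Int × Int × Int) :=
  if sf ≠ n.2.2 ∧ acc.1 = false then (true, acc.2.2, [n])
  else (acc.1, acc.2.1, acc.2.2 ++ [n])

def func (bfs : List Int) (start : List (Int × Int × Int)) (goal : Int × Int × Int) : (List (Int × Int × Int)) × (List (Int × Int × Int)) :=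
  match PySem.List.pyGet? start 0 with
  | none => ([], [])   -- start[0] raises IndexError in Python; excluded by Pre_func
  | some s0 =>
    let st := start.foldl (funcStepA s0.2.2) (false, [], [])
    (st.2.1, st.2.2)

-- ===== PORT B =====
def func_alt (bfs : List Int) (start : List (Int × Int × Int)) (goal : Int × Int × Int) : (List (Int × Int × Int)) × (List (Int × Int × Int)) :=
  match PySem.List.pyGet? start 0 with
  | none => ([], [])   -- start[0] raises IndexError in Python; excluded by Pre_func
  | some s0 =>
    let split : Int :=
      match start.findIdx? (fun n => n.2.2 ≠ s0.2.2) with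
      | some i => (i : Int)
      | none => 0
    (PySem.List.slice start none (some split), PySem.List.slice start (some split) none)

-- ===== PRECONDITION & SPEC =====
-- Pre_func excludes only the empty start list, on which Python A raises IndexError at start[0].
def Pre_func (bfs : List Int) (start : List (Int × Int × Int)) (goal : Int × Int × Int) : Prop := start ≠ []
instance (bfs : List Int) (start : List (Int × Int × Int)) (goal : Int × Int × Int) : Decidable (Pre_func bfs start goal) := by unfold Pre_func; infer_instance
def pvWitness_func : List Int × (List (Int × Int × Int)) × (Int × Int × Int) := ([1], [(0, 0, 1), (2, 3, 2)], (2, 3, 2))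
def Spec_func (bfs : List Int) (start : List (Int × Int × Int)) (goal : Int × Int × Int) (out : (List (Int × Int × Int)) × (List (Int × Int × Int))) : Prop := out = func_alt bfs start goal
instance (bfs : List Int) (start : List (Int × Int × Int)) (goal : Int × Int × Int) (out : (List (Int × Int × Int)) × (List (Int × Int × Int))) : Decidable (Spec_func bfs start goal out) := by unfold Spec_func; infer_instance

-- ===== CLAIM (what is proved, stated in full; the proofs are below) =====
def Claim_equal_func : Prop := ∀ (bfs : List Int) (start : List (Int × Int × Int)) (goal : Int × Int × Int), Dom_func bfs start goal → Pre_func bfs start goal → Spec_func bfs start goal (func bfs start goal)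

-- ===== LEMMAS AND PROOFS =====

-- once twoFloors is set, A's loop only appends to after_stairs
theorem funcFoldA_true (sf : Int) (l : List (Int × Int × Int))
    (b a : List (Int × Int × Int)) :
    l.foldl (funcStepA sf) (true, b, a) = (true, b, a ++ l) := by
  induction l generalizing a with
  | nil => simp
  | cons x xs ih =>
    simp only [List.foldl_cons, funcStepA]
    simp [ih]

-- before twoFloors is set: the fold splits at the first floor change (if any)
theorem funcFoldA_false (sf : Int) (l : List (Int × Int × Int))
    (a : List (Int × Int × Int)) :
    l.foldl (funcStepA sf) (false, [], a) =
      match l.findIdx? (fun n => n.2.2 ≠ sf) with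
      | none => (false, [], a ++ l)
      | some i => (true, a ++ l.take i, l.drop i) := by
  induction l generalizing a with
  | nil => simp
  | cons x xs ih =>
    by_cases hx : x.2.2 = sf
    · have hidx : (x :: xs).findIdx? (fun n => n.2.2 ≠ sf) =
          (xs.findIdx? (fun n => n.2.2 ≠ sf)).map (· + 1) := by
        rw [List.findIdx?_cons]
        simp [hx]
      have hstep : funcStepA sf (false, [], a) x = (false, [], a ++ [x]) := by
        simp [funcStepA, hx]
      rw [List.foldl_cons, hstep, ih, hidx]
      cases xs.findIdx? (fun n => n.2.2 ≠ sf) with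
      | none => simp
      | some i => simp
    · have hidx : (x :: xs).findIdx? (fun n => n.2.2 ≠ sf) = some 0 := by
        rw [List.findIdx?_cons]
        simp [hx]
      have hx' : sf ≠ x.2.2 := fun h => hx h.symm
      have hstep : funcStepA sf (false, [], a) x = (true, a, [x]) := by
        simp [funcStepA, hx']
      rw [List.foldl_cons, hstep, funcFoldA_true, hidx]
      simp

-- ===== VERDICT (by name: the statement is the Claim_ definition above) =====
theorem func_spec : Claim_equal_func := by
  unfold Claim_equal_func
  intro bfs start goal _ hpre
  unfold Spec_func func func_alt
  obtain ⟨s0, rest, rfl⟩ := List.exists_cons_of_ne_nil hpre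
  have h0 : PySem.List.pyGet? (s0 :: rest) 0 = some s0 := by
    simp [PySem.List.pyGet?, PySem.List.pyIdx?]
  simp only [h0]
  rw [show ((false : Bool), ([] : List (Int × Int × Int)), ([] : List (Int × Int × Int))) = (false, [], []) from rfl]
  rw [funcFoldA_false s0.2.2 (s0 :: rest) []]
  cases hidx : (s0 :: rest).findIdx? (fun n => n.2.2 ≠ s0.2.2) with
  | none =>
    rw [PySem.List.slice_to _ (le_refl (0 : Int)), PySem.List.slice_from _ (le_refl (0 : Int))]
    simp
  | some i =>
    simp only [PySem.List.slice_to_natCast, PySem.List.slice_from_natCast]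
    simp
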